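-- pv_equiv track=rewrite | github.com/sprax/python | iq/palin_num.py | is_chunky_palindrome
-- ===== SOURCE A (Python) =====
-- def is_chunky_palindrome(string):
--     '''
--     true IFF palindrome in chunks, as in:
--     volvo -> (vo)l(vo)
--     oliverelivo -> (o)(liv)(e)(r)(e)(liv)(o)
--     Greedy algorithm should succeed.
--     '''
--     half_len = len(string) // 2
--     beg = 0
--     while beg < half_len:
--         end = -1 - beg
--         if string[beg] != string[end]:
--             end = None if end == -1 else end + 1
--             for med in range(beg+2, half_len+1):
--                 if string[beg:med] == string[-med:end]:
--                     beg = med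
--                     break
--             else:
--                 return False
--         else:
--             beg += 1
--     return True
-- ===== SOURCE B (Python) =====
-- MOD = (1 << 61) - 1
-- BASE = 131
--
--
-- def is_chunky_palindrome(string):
--     n = len(string)
--     half = n // 2
--     i = 0
--     while i < half:
--         # grow a candidate chunk of length k from both ends, keeping rolling
--         # hashes hl (of string[i:i+k]) and hr (of string[n-i-k:n-i]) so that
--         # almost every candidate is rejected in O(1); a hash match is verified.
--         k = 1
--         hl = ord(string[i]) % MOD
--         hr = ord(string[n - i - 1]) % MOD
--         pw = 1
--         while True:
--             if hl == hr and string[i:i + k] == string[n - i - k:n - i]: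
--                 i += k
--                 break
--             k += 1
--             if i + k > half:
--                 return False
--             pw = pw * BASE % MOD
--             hl = (hl * BASE + ord(string[i + k - 1])) % MOD
--             hr = (hr + ord(string[n - i - k]) * pw) % MOD
--     return True
-- ===== Notes on version B (the rewrite author's own statement) =====
-- stated objective: faster
-- what changed: B keeps rolling polynomial hashes of the growing left/right candidate chunks (extended O(1) per candidate and verified by a direct comparison only on a hash hit) instead of A's fresh O(k) slice comparison for every candidate chunk length, turning the greedy shortest-chunk search from quadratic slice comparisons into hash updates.
import Mathlib
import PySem

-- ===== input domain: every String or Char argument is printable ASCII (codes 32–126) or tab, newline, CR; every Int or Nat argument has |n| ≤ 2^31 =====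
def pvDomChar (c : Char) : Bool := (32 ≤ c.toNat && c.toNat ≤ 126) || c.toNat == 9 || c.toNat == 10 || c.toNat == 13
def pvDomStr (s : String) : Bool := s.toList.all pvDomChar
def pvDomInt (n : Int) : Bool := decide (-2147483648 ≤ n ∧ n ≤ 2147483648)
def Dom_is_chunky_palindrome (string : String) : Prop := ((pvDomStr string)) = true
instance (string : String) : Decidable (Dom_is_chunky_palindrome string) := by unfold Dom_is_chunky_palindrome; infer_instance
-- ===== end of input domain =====

-- B replaces A's repeated slice comparisons by rolling hashes (verified on a hash hit),
-- rejecting almost every candidate chunk in O(1); equivalence: both greedily take the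
-- shortest matching chunk, and a hash test is redundant next to the verifying comparison.

-- ===== PORT A =====
-- inner 'for med in range(beg+2, half_len+1): … break / else: return False' of A
def aFind (s : List Char) (beg : Int) (end? : Option Int) : List Int → Option Int
  | [] => none
  | med :: rest =>
    if PySem.List.slice s (some beg) (some med) = PySem.List.slice s (some (-med)) end?
    then some med
    else aFind s beg end? rest

-- A's while loop; fuel is only a totality guard: beg strictly increases each iteration,
-- so with fuel = len+1 the 0-fuel branch is never reached.
def aLoop (s : List Char) (half : Int) (fuel : Nat) (beg : Int) : Bool :=
  match fuel with
  | 0 => true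
  | fuel + 1 =>
    if beg < half then
      if PySem.List.pyGet? s beg ≠ PySem.List.pyGet? s (-1 - beg) then
        match aFind s beg (if -1 - beg = -1 then none else some (-1 - beg + 1))
            (PySem.List.pyRange (beg + 2) (half + 1) 1) with
        | none => false
        | some med => aLoop s half fuel med
      else aLoop s half fuel (beg + 1)
    else true

def is_chunky_palindrome (string : String) : Bool :=
  let s := string.toList
  let half := PySem.Int.floordiv (s.length : Int) 2
  aLoop s half (s.length + 1) 0

-- ===== PORT B =====
def pyMOD : Int := 2 ^ 61 - 1
def pyBASE : Int := 131

-- B's inner 'while True' loop; indices handed to pyGetD are provably in range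
-- (0 ≤ i, i + k ≤ half, 2*half ≤ n), so the default 'a' is never used.
def bInner (s : List Char) (n half : Int) (i k hl hr pw : Int) : Option Int :=
  if hl = hr ∧ PySem.List.slice s (some i) (some (i + k))
      = PySem.List.slice s (some (n - i - k)) (some (n - i)) then
    some (i + k)
  else if h : i + (k + 1) > half then none
  else
    let pw' := PySem.Int.mod (pw * pyBASE) pyMOD
    let hl' := PySem.Int.mod (hl * pyBASE + ((PySem.List.pyGetD s (i + (k + 1) - 1) 'a').toNat : Int)) pyMOD
    let hr' := PySem.Int.mod (hr + ((PySem.List.pyGetD s (n - i - (k + 1)) 'a').toNat : Int) * pw') pyMOD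
    bInner s n half i (k + 1) hl' hr' pw'
termination_by (half - i - k).toNat
decreasing_by omega

-- B's outer while loop; fuel = len+1 is a totality guard exactly as in aLoop.
def bLoop (s : List Char) (n half : Int) (fuel : Nat) (i : Int) : Bool :=
  match fuel with
  | 0 => true
  | fuel + 1 =>
    if i < half then
      match bInner s n half i 1
          (PySem.Int.mod ((PySem.List.pyGetD s i 'a').toNat : Int) pyMOD)
          (PySem.Int.mod ((PySem.List.pyGetD s (n - i - 1) 'a').toNat : Int) pyMOD)
          1 with
      | none => false
      | some i' => bLoop s n half fuel i'
    else true

def is_chunky_palindrome_alt (string : String) : Bool :=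
  let s := string.toList
  let n : Int := s.length
  let half := PySem.Int.floordiv n 2
  bLoop s n half (s.length + 1) 0

-- ===== PRECONDITION & SPEC =====
def Spec_is_chunky_palindrome (string : String) (out : Bool) : Prop := out = is_chunky_palindrome_alt string
instance (string : String) (out : Bool) : Decidable (Spec_is_chunky_palindrome string out) := by unfold Spec_is_chunky_palindrome; infer_instance

-- ===== CLAIM (what is proved, stated in full; the proofs are below) =====
def Claim_equal_is_chunky_palindrome : Prop := ∀ (string : String), Dom_is_chunky_palindrome string → Spec_is_chunky_palindrome string (is_chunky_palindrome string)

-- ===== LEMMAS AND PROOFS =====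

-- proof-side vocabulary: the two symmetric chunks of length k at offset i
def chunkL (s : List Char) (i k : Int) : List Char :=
  PySem.List.slice s (some i) (some (i + k))
def chunkR (s : List Char) (n i k : Int) : List Char :=
  PySem.List.slice s (some (n - i - k)) (some (n - i))

-- the smallest k' ≥ k with i + k' ≤ half whose chunks match (what both inner searches compute)
def firstK (s : List Char) (n half i k : Int) : Option Int :=
  if h : half < i + k then none
  else if chunkL s i k = chunkR s n i k then some k
  else firstK s n half i (k + 1)
termination_by (half + 1 - i - k).toNat
decreasing_by omega

-- the polynomial hash value (before reduction mod pyMOD)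
def polyAcc (acc : Int) (L : List Char) : Int :=
  L.foldl (fun h c => h * pyBASE + (c.toNat : Int)) acc

-- ---- hash arithmetic ----

lemma polyAcc_shift (L : List Char) (a : Int) :
    polyAcc a L = a * pyBASE ^ L.length + polyAcc 0 L := by
  induction L generalizing a with
  | nil => simp [polyAcc]
  | cons c L ih =>
    show polyAcc (a * pyBASE + (c.toNat : Int)) L
        = a * pyBASE ^ (c :: L).length + polyAcc 0 (c :: L)
    have h2 : polyAcc 0 (c :: L) = polyAcc ((0 : Int) * pyBASE + (c.toNat : Int)) L := rfl
    rw [ih, h2, ih ((0 : Int) * pyBASE + (c.toNat : Int)), List.length_cons, pow_succ]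
    ring

lemma polyAcc_append_singleton (L : List Char) (c : Char) :
    polyAcc 0 (L ++ [c]) = polyAcc 0 L * pyBASE + (c.toNat : Int) := by
  simp [polyAcc, List.foldl_append]

lemma polyAcc_cons (c : Char) (L : List Char) :
    polyAcc 0 (c :: L) = (c.toNat : Int) * pyBASE ^ L.length + polyAcc 0 L := by
  show polyAcc ((0 : Int) * pyBASE + (c.toNat : Int)) L = _
  rw [polyAcc_shift]
  ring_nf

lemma pyMOD_pos : (0 : Int) < pyMOD := by norm_num [pyMOD]

lemma stepL (p b o M : Int) : (p % M * b + o) % M = (p * b + o) % M := by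
  conv_lhs => rw [Int.add_emod, Int.mul_emod]
  conv_rhs => rw [Int.add_emod, Int.mul_emod]
  rw [Int.emod_emod_of_dvd _ dvd_rfl]

lemma stepP (p b M : Int) : (p % M * b) % M = (p * b) % M := by
  conv_lhs => rw [Int.mul_emod]
  conv_rhs => rw [Int.mul_emod]
  rw [Int.emod_emod_of_dvd _ dvd_rfl]

lemma stepR (p o q M : Int) : (p % M + o * (q % M)) % M = (p + o * q) % M := by
  conv_lhs => rw [Int.add_emod]
  conv_rhs => rw [Int.add_emod]
  rw [Int.emod_emod_of_dvd _ dvd_rfl,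
      Int.mul_emod o (q % M), Int.emod_emod_of_dvd _ dvd_rfl, ← Int.mul_emod]

-- ---- chunk structure ----

lemma chunkL_one (s : List Char) {i : Int} (h0 : 0 ≤ i) (h1 : i < (s.length : Int)) :
    chunkL s i 1 = [s.getD i.toNat 'a'] := by
  unfold chunkL
  rw [PySem.List.slice_toNat s h0 (by omega)]
  have h2 : (i + 1).toNat - i.toNat = 1 := by omega
  have h3 : i.toNat < s.length := by omega
  rw [h2, List.drop_eq_getElem_cons h3, List.getD_eq_getElem s 'a' h3]
  rfl

lemma chunkR_one (s : List Char) {n i : Int} (hn : n = (s.length : Int))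
    (h0 : 0 ≤ i) (h1 : i < n) :
    chunkR s n i 1 = [s.getD (n - i - 1).toNat 'a'] := by
  unfold chunkR
  rw [PySem.List.slice_toNat s (by omega) (by omega)]
  have h2 : (n - i).toNat - (n - i - 1).toNat = 1 := by omega
  have h3 : (n - i - 1).toNat < s.length := by omega
  rw [h2, List.drop_eq_getElem_cons h3, List.getD_eq_getElem s 'a' h3]
  rfl

lemma chunkL_succ (s : List Char) {i k : Int} (h0 : 0 ≤ i) (hk : 0 ≤ k)
    (hik : i + k < (s.length : Int)) :
    chunkL s i (k + 1) = chunkL s i k ++ [s.getD (i + k).toNat 'a'] := by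
  unfold chunkL
  rw [PySem.List.slice_toNat s h0 (by omega), PySem.List.slice_toNat s h0 (by omega)]
  have h2 : (i + (k + 1)).toNat - i.toNat = k.toNat + 1 := by omega
  have h3 : (i + k).toNat - i.toNat = k.toNat := by omega
  have h4 : i.toNat + k.toNat < s.length := by omega
  rw [h2, h3, List.take_add_one, List.getElem?_drop,
      List.getElem?_eq_getElem h4,
      List.getD_eq_getElem s 'a' (by omega : (i + k).toNat < s.length)]
  have h5 : i.toNat + k.toNat = (i + k).toNat := by omega
  simp [h5]

lemma chunkR_succ (s : List Char) {n i k : Int} (hn : n = (s.length : Int))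
    (h0 : 0 ≤ i) (hk : 0 ≤ k) (hik : i + k < n) :
    chunkR s n i (k + 1) = s.getD (n - i - k - 1).toNat 'a' :: chunkR s n i k := by
  unfold chunkR
  rw [PySem.List.slice_toNat s (by omega) (by omega),
      PySem.List.slice_toNat s (by omega) (by omega)]
  have hb : (n - i - k - 1).toNat < s.length := by omega
  have h1 : n - i - (k + 1) = n - i - k - 1 := by ring
  rw [h1]
  have h2 : (n - i).toNat - (n - i - k - 1).toNat = k.toNat + 1 := by omega
  have h3 : (n - i).toNat - (n - i - k).toNat = k.toNat := by omega
  rw [h2, h3, List.drop_eq_getElem_cons hb, List.take_succ_cons,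
      List.getD_eq_getElem s 'a' hb]
  have h5 : (n - i - k - 1).toNat + 1 = (n - i - k).toNat := by omega
  rw [h5]

lemma length_chunkR (s : List Char) {n i k : Int} (hn : n = (s.length : Int))
    (h0 : 0 ≤ i) (hk : 0 ≤ k) (hik : i + k ≤ n) :
    (chunkR s n i k).length = k.toNat := by
  unfold chunkR
  rw [PySem.List.slice_toNat s (by omega) (by omega)]
  simp [List.length_take, List.length_drop]
  omega

-- ---- the inner searches compute firstK ----

lemma firstK_ge (s : List Char) (n half : Int) :
    ∀ (fm : Nat) (i k0 k : Int), (half + 1 - i - k0).toNat < fm →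
    firstK s n half i k0 = some k → k0 ≤ k := by
  intro fm
  induction fm with
  | zero => intro i k0 k hm _; omega
  | succ fm ih =>
    intro i k0 k hm hf
    rw [firstK] at hf
    by_cases h1 : half < i + k0
    · rw [dif_pos h1] at hf; cases hf
    · rw [dif_neg h1] at hf
      by_cases h2 : chunkL s i k0 = chunkR s n i k0
      · rw [if_pos h2] at hf
        injection hf with h
        omega
      · rw [if_neg h2] at hf
        have := ih i (k0 + 1) k (by omega) hf
        omega

lemma bInner_eq_firstK (s : List Char) {n half : Int} (hn : n = (s.length : Int))
    (hhalf : 2 * half ≤ n) :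
    ∀ (m : Nat) (k hl hr pw i : Int), (half - i - k).toNat < m →
    0 ≤ i → 1 ≤ k → i + k ≤ half →
    hl = polyAcc 0 (chunkL s i k) % pyMOD →
    hr = polyAcc 0 (chunkR s n i k) % pyMOD →
    pw = pyBASE ^ (k - 1).toNat % pyMOD →
    bInner s n half i k hl hr pw = (firstK s n half i k).map (fun k' => i + k') := by
  intro m
  induction m with
  | zero => intro k hl hr pw i hm; omega
  | succ m ih =>
    intro k hl hr pw i hm h0 hk1 hkh hl0 hr0 hpw
    rw [bInner, firstK]
    rw [dif_neg (by omega : ¬ half < i + k)]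
    by_cases hc : chunkL s i k = chunkR s n i k
    · have heq : hl = hr := by rw [hl0, hr0, hc]
      rw [if_pos ⟨heq, hc⟩, if_pos hc]
      rfl
    · rw [if_neg (fun hand => hc hand.2), if_neg hc]
      by_cases hbig : i + (k + 1) > half
      · rw [dif_pos hbig, firstK, dif_pos (by omega)]
        rfl
      · rw [dif_neg hbig]
        have hiklen : i + k < (s.length : Int) := by omega
        have hgd1 : PySem.List.pyGetD s (i + (k + 1) - 1) 'a' = s.getD (i + k).toNat 'a' := by
          have h1 : i + (k + 1) - 1 = i + k := by ring
          rw [h1, PySem.List.pyGetD_eq_getElem s 'a' (by omega) (by omega),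
              List.getD_eq_getElem s 'a' (by omega)]
        have hgd2 : PySem.List.pyGetD s (n - i - (k + 1)) 'a' = s.getD (n - i - k - 1).toNat 'a' := by
          have h1 : n - i - (k + 1) = n - i - k - 1 := by ring
          rw [h1, PySem.List.pyGetD_eq_getElem s 'a' (by omega) (by omega),
              List.getD_eq_getElem s 'a' (by omega)]
        apply ih (k + 1) _ _ _ i (by omega) h0 (by omega) (by omega)
        · -- hl invariant at k+1
          rw [hgd1, hl0, PySem.Int.mod_eq_emod_of_pos pyMOD_pos, stepL,
              chunkL_succ s h0 (by omega) hiklen, polyAcc_append_singleton]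
        · -- hr invariant at k+1
          rw [hgd2, hr0, hpw, PySem.Int.mod_eq_emod_of_pos pyMOD_pos,
              PySem.Int.mod_eq_emod_of_pos pyMOD_pos, stepP, stepR,
              chunkR_succ s hn h0 (by omega) (by omega), polyAcc_cons,
              length_chunkR s hn h0 (by omega) (by omega)]
          have hpow : pyBASE ^ (k - 1).toNat * pyBASE = pyBASE ^ k.toNat := by
            rw [← pow_succ]
            congr 1
            omega
          rw [hpow]
          ring_nf
        · -- pw invariant at k+1
          rw [hpw, PySem.Int.mod_eq_emod_of_pos pyMOD_pos, stepP, ← pow_succ]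
          congr 2
          omega

-- Python's negative-index right slice string[-m:end] rewritten with nonnegative bounds
lemma clampIdx_of_neg (len : Nat) {x : Int} (h1 : x < 0) (h2 : 0 ≤ (len : Int) + x) :
    PySem.List.clampIdx len x = ((len : Int) + x).toNat := by
  unfold PySem.List.clampIdx
  rw [if_pos h1, if_neg (by omega)]

lemma slice_clamp {α : Type} (s : List α) (a b : Int) :
    PySem.List.slice s (some a) (some b)
      = List.take (PySem.List.clampIdx s.length b - PySem.List.clampIdx s.length a)
          (List.drop (PySem.List.clampIdx s.length a) s) := rfl

lemma sliceNeg (s : List Char) {n b m : Int} (hn : n = (s.length : Int))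
    (h0 : 0 ≤ b) (hbm : b < m) (hmn : m ≤ n) :
    PySem.List.slice s (some (-m)) (if -1 - b = -1 then none else some (-1 - b + 1))
      = PySem.List.slice s (some (n - m)) (some (n - b)) := by
  rw [PySem.List.slice_toNat s (by omega) (by omega)]
  by_cases hb : b = 0
  · subst hb
    rw [if_pos (by norm_num)]
    rw [PySem.List.slice_some_none, clampIdx_of_neg s.length (by omega) (by omega)]
    have h2 : ((s.length : Int) + -m).toNat = (n - m).toNat := by omega
    rw [h2, List.take_of_length_le (by simp [List.length_drop]; omega)]
  · rw [if_neg (by omega)]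
    have h1 : -1 - b + 1 = -b := by ring
    rw [h1, slice_clamp, clampIdx_of_neg s.length (by omega) (by omega),
        clampIdx_of_neg s.length (by omega) (by omega)]
    have h2 : ((s.length : Int) + -m).toNat = (n - m).toNat := by omega
    have h3 : ((s.length : Int) + -b).toNat = (n - b).toNat := by omega
    rw [h2, h3]

lemma aFind_eq_firstK (s : List Char) {n half beg : Int} (hn : n = (s.length : Int))
    (hhalf : 2 * half ≤ n) (h0 : 0 ≤ beg) :
    ∀ (fm : Nat) (m : Int), (half + 1 - m).toNat < fm → beg + 2 ≤ m →
    aFind s beg (if -1 - beg = -1 then none else some (-1 - beg + 1))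
        (PySem.List.pyRange m (half + 1) 1)
      = (firstK s n half beg (m - beg)).map (fun k' => beg + k') := by
  intro fm
  induction fm with
  | zero => intro m hm; omega
  | succ fm ih =>
    intro m hm hbm
    by_cases hend : half < m
    · rw [PySem.List.pyRange_one_eq_nil (by omega), firstK, dif_pos (by omega)]
      rfl
    · rw [PySem.List.pyRange_one_cons (by omega), firstK, dif_neg (by omega)]
      have hCL : chunkL s beg (m - beg) = PySem.List.slice s (some beg) (some m) := by
        unfold chunkL
        have h1 : beg + (m - beg) = m := by ring
        rw [h1]
      have hCR : chunkR s n beg (m - beg)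
          = PySem.List.slice s (some (n - m)) (some (n - beg)) := by
        unfold chunkR
        have h1 : n - beg - (m - beg) = n - m := by ring
        rw [h1]
      rw [aFind, sliceNeg s hn h0 (by omega) (by omega)]
      by_cases hc : chunkL s beg (m - beg) = chunkR s n beg (m - beg)
      · rw [if_pos (by rw [← hCL, ← hCR]; exact hc), if_pos hc]
        simp only [Option.map_some]
        have h1 : beg + (m - beg) = m := by ring
        rw [h1]
      · rw [if_neg (by rw [← hCL, ← hCR]; exact hc), if_neg hc]
        have h1 : m - beg + 1 = m + 1 - beg := by ring
        rw [h1, ih (m + 1) (by omega) (by omega)]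

-- ---- the k = 1 test is A's character test ----

lemma charEq_iff (s : List Char) {n i : Int} (hn : n = (s.length : Int))
    (h0 : 0 ≤ i) (h2 : 2 * i + 1 < n) :
    (PySem.List.pyGet? s i = PySem.List.pyGet? s (-1 - i))
      ↔ chunkL s i 1 = chunkR s n i 1 := by
  rw [chunkL_one s h0 (by omega), chunkR_one s hn h0 (by omega)]
  have hg1 : PySem.List.pyGet? s i = some (s.getD i.toNat 'a') := by
    unfold PySem.List.pyGet? PySem.List.pyIdx?
    rw [if_pos h0, if_pos (by omega : i < (s.length : Int))]
    show s[i.toNat]? = _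
    rw [List.getElem?_eq_getElem (by omega), List.getD_eq_getElem s 'a' (by omega)]
  have hg2 : PySem.List.pyGet? s (-1 - i) = some (s.getD (n - i - 1).toNat 'a') := by
    unfold PySem.List.pyGet? PySem.List.pyIdx?
    rw [if_neg (by omega), if_pos (by omega)]
    show s[s.length - (-(-1 - i)).toNat]? = _
    have he : s.length - (-(-1 - i)).toNat = (n - i - 1).toNat := by omega
    rw [he, List.getElem?_eq_getElem (by omega), List.getD_eq_getElem s 'a' (by omega)]
  rw [hg1, hg2]
  simp

-- ---- the outer loops agree step by step ----

lemma loops_eq (s : List Char) {n half : Int} (hn : n = (s.length : Int))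
    (hhalf : 2 * half ≤ n) :
    ∀ (fuel : Nat) (i : Int), 0 ≤ i → aLoop s half fuel i = bLoop s n half fuel i := by
  intro fuel
  induction fuel with
  | zero => intro i h0; rfl
  | succ fuel ih =>
    intro i h0
    rw [aLoop, bLoop]
    by_cases hi : i < half
    · rw [if_pos hi, if_pos hi]
      have hi2 : 2 * i + 1 < n := by omega
      have hbeq : bInner s n half i 1
            (PySem.Int.mod ((PySem.List.pyGetD s i 'a').toNat : Int) pyMOD)
            (PySem.Int.mod ((PySem.List.pyGetD s (n - i - 1) 'a').toNat : Int) pyMOD) 1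
          = (firstK s n half i 1).map (fun k' => i + k') := by
        apply bInner_eq_firstK s hn hhalf ((half - i - 1).toNat + 1) 1 _ _ _ i
          (by omega) h0 le_rfl (by omega)
        · rw [chunkL_one s h0 (by omega)]
          have hpa : polyAcc 0 [s.getD i.toNat 'a'] = ((s.getD i.toNat 'a').toNat : Int) := by
            simp [polyAcc]
          rw [hpa, PySem.Int.mod_eq_emod_of_pos pyMOD_pos,
              PySem.List.pyGetD_eq_getElem s 'a' h0 (by omega),
              List.getD_eq_getElem s 'a' (by omega)]
        · rw [chunkR_one s hn h0 (by omega)]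
          have hpa : polyAcc 0 [s.getD (n - i - 1).toNat 'a']
              = ((s.getD (n - i - 1).toNat 'a').toNat : Int) := by
            simp [polyAcc]
          rw [hpa, PySem.Int.mod_eq_emod_of_pos pyMOD_pos,
              PySem.List.pyGetD_eq_getElem s 'a' (by omega) (by omega),
              List.getD_eq_getElem s 'a' (by omega)]
        · norm_num [pyMOD, pyBASE]
      rw [hbeq, firstK, dif_neg (by omega : ¬ half < i + 1)]
      by_cases hc : chunkL s i 1 = chunkR s n i 1
      · rw [if_pos hc]
        have hch : PySem.List.pyGet? s i = PySem.List.pyGet? s (-1 - i) :=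
          (charEq_iff s hn h0 hi2).2 hc
        rw [if_neg (not_not_intro hch)]
        simp only [Option.map_some]
        exact ih (i + 1) (by omega)
      · rw [if_neg hc]
        have hch : PySem.List.pyGet? s i ≠ PySem.List.pyGet? s (-1 - i) :=
          fun h => hc ((charEq_iff s hn h0 hi2).1 h)
        rw [if_pos hch]
        rw [aFind_eq_firstK s hn hhalf h0 ((half + 1 - (i + 2)).toNat + 1) (i + 2)
          (by omega) (by omega)]
        have h22 : i + 2 - i = 2 := by ring
        have h12 : (1 : Int) + 1 = 2 := by norm_num
        rw [h22, h12]
        cases hf : firstK s n half i 2 with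
        | none => rfl
        | some k =>
          simp only [Option.map_some]
          have hk2 := firstK_ge s n half ((half + 1 - i - 2).toNat + 1) i 2 k (by omega) hf
          exact ih (i + k) (by omega)
    · rw [if_neg hi, if_neg hi]

-- ===== VERDICT =====
theorem is_chunky_palindrome_spec : Claim_equal_is_chunky_palindrome := by
  intro string _
  show is_chunky_palindrome string = is_chunky_palindrome_alt string
  unfold is_chunky_palindrome is_chunky_palindrome_alt
  have h2 : PySem.Int.floordiv ((string.toList.length : Int)) 2
      = (string.toList.length : Int) / 2 :=
    PySem.Int.floordiv_eq_ediv_of_pos (by norm_num)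
  exact loops_eq string.toList rfl (by rw [h2]; omega)
    (string.toList.length + 1) 0 le_rfl
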